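-- pv_equiv track=rewrite | github.com/stupidcucumber/ENG-NER | src/features.py | numbers2labels
-- ===== SOURCE A (Python) =====
-- def numbers2labels(numbers: list[int]) -> list[str]:
--     """Translates ids of the classes into corresponding
--     names.
--
--     Parameters
--     ----------
--     numbers : list[int]
--         List of indices where:
--         - 0: NON-ENTITY
--         - 1: LOCATION
--         - 2: PERSON
--         - 4: MISC
--
--     Returns
--     -------
--     list[str]
--         Named labels.
--     """
--     result = []
--
--     _map = {0: "NON-ENTITY", 1: "LOCATION", 2: "PERSON", 4: "MISC"}
--
--     last_number = None
--     for number in numbers: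
--         if number == 0:
--             last_number = None
--             result.append(_map[number])
--         else:
--             if last_number != number:
--                 last_number = number
--                 result.append(f"B-{_map[number]}")
--             else:
--                 result.append(f"I-{_map[number]}")
--
--     return result
-- ===== SOURCE B (Python) =====
-- from itertools import groupby
--
--
-- def numbers2labels(numbers: list[int]) -> list[str]:
--     """Translates ids of the classes into corresponding names (run-based)."""
--     _map = {0: "NON-ENTITY", 1: "LOCATION", 2: "PERSON", 4: "MISC"}
--     result = []
--     for value, group in groupby(numbers):
--         count = sum(1 for _ in group)
--         if value == 0:
--             result.extend([_map[0]] * count)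
--         else:
--             result.append(f"B-{_map[value]}")
--             result.extend([f"I-{_map[value]}"] * (count - 1))
--     return result
-- ===== Notes on version B (the rewrite author's own statement) =====
-- stated objective: idiomatic
-- what changed: replaces the last_number state machine with itertools.groupby run-grouping: each maximal run of equal ids is emitted at once (NON-ENTITY per element for 0, B- then I- labels for a non-zero id)
import Mathlib
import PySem

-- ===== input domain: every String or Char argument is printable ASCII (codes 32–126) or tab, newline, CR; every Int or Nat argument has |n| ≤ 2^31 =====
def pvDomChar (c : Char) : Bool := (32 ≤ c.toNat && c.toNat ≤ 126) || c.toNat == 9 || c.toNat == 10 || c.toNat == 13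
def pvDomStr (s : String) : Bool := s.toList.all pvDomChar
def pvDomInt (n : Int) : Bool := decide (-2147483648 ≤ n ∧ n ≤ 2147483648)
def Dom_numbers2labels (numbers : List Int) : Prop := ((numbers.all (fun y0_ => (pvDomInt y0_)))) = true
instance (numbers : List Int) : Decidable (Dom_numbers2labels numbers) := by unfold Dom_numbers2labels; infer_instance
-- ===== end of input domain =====

-- B changes the decomposition (idiomatic groupby run-grouping instead of a last_number state machine); same O(n) cost.

-- ===== PORT A =====
-- _map = {0: "NON-ENTITY", 1: "LOCATION", 2: "PERSON", 4: "MISC"}; lookup _map[n]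
-- raises KeyError in Python for other ids — excluded by Pre_; the port returns "" there.
def pvMap : PySem.Dict Int String :=
  (((PySem.Dict.empty.insert 0 "NON-ENTITY").insert 1 "LOCATION").insert 2 "PERSON").insert 4 "MISC"

def pvMapGet (n : Int) : String := (pvMap.get? n).getD ""

-- the for-loop of A, state = last_number (None ↦ none)
def numbers2labelsLoop (last : Option Int) : List Int → List String
  | [] => []
  | n :: ns =>
      if n = 0 then
        pvMapGet 0 :: numbers2labelsLoop none ns
      else
        if last ≠ some n then
          ("B-" ++ pvMapGet n) :: numbers2labelsLoop (some n) ns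
        else
          ("I-" ++ pvMapGet n) :: numbers2labelsLoop (some n) ns

def numbers2labels (numbers : List Int) : List String :=
  numbers2labelsLoop none numbers

-- ===== PORT B =====
-- itertools.groupby: collapse the list into maximal runs (value, length)
def pvRunsAux (x : Int) (n : Nat) : List Int → List (Int × Nat)
  | [] => [(x, n)]
  | y :: ys => if y = x then pvRunsAux x (n + 1) ys else (x, n) :: pvRunsAux y 1 ys

def pvRuns : List Int → List (Int × Nat)
  | [] => []
  | x :: xs => pvRunsAux x 1 xs

-- labels emitted for one run
def pvEmit (r : Int × Nat) : List String :=
  if r.1 = 0 then List.replicate r.2 (pvMapGet 0)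
  else ("B-" ++ pvMapGet r.1) :: List.replicate (r.2 - 1) ("I-" ++ pvMapGet r.1)

def numbers2labels_alt (numbers : List Int) : List String :=
  (pvRuns numbers).flatMap pvEmit

-- ===== PRECONDITION & SPEC =====
-- Pre_ excludes ids outside {0,1,2,4}, on which Python A raises KeyError.
def Pre_numbers2labels (numbers : List Int) : Prop :=
  ∀ n ∈ numbers, n = 0 ∨ n = 1 ∨ n = 2 ∨ n = 4
instance (numbers : List Int) : Decidable (Pre_numbers2labels numbers) := by
  unfold Pre_numbers2labels; infer_instance
def pvWitness_numbers2labels : List Int := [1, 1, 0, 2, 4, 4, 0, 0, 1]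

def Spec_numbers2labels (numbers : List Int) (out : List String) : Prop := out = numbers2labels_alt numbers
instance (numbers : List Int) (out : List String) : Decidable (Spec_numbers2labels numbers out) := by unfold Spec_numbers2labels; infer_instance

-- ===== CLAIM (what is proved, stated in full; the proofs are below) =====
def Claim_equal_numbers2labels : Prop := ∀ (numbers : List Int), Dom_numbers2labels numbers → Pre_numbers2labels numbers → Spec_numbers2labels numbers (numbers2labels numbers)

-- ===== LEMMAS AND PROOFS =====

-- the label A emits while inside a run of x, and the state A carries there
def pvCont (x : Int) : String := if x = 0 then pvMapGet 0 else "I-" ++ pvMapGet x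
def pvFirst (x : Int) : String := if x = 0 then pvMapGet 0 else "B-" ++ pvMapGet x
def pvSt (x : Int) : Option Int := if x = 0 then none else some x

-- core invariant: emitting the runs accumulated from state (x, n+1 seen) equals
-- the n pending in-run labels followed by A's loop from the corresponding state
theorem pvRunsAux_emit (xs : List Int) : ∀ (x : Int) (n : Nat),
    (pvRunsAux x (n + 1) xs).flatMap pvEmit
      = pvFirst x :: (List.replicate n (pvCont x) ++ numbers2labelsLoop (pvSt x) xs) := by
  induction xs with
  | nil =>
      intro x n
      by_cases hx : x = 0 <;>
        simp [pvRunsAux, pvEmit, pvFirst, pvCont, numbers2labelsLoop, hx, List.replicate_succ]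
  | cons y ys ih =>
      intro x n
      by_cases hyx : y = x
      · subst hyx
        rw [pvRunsAux, if_pos rfl, ih y (n + 1)]
        by_cases hy : y = 0
        · simp [numbers2labelsLoop, pvSt, pvCont, hy, List.replicate_succ',
            List.append_assoc]
        · simp [numbers2labelsLoop, pvSt, pvCont, hy, List.replicate_succ',
            List.append_assoc]
      · rw [pvRunsAux, if_neg hyx]
        simp only [List.flatMap_cons, ih y 0]
        by_cases hy : y = 0
        · by_cases hx : x = 0 <;>
            simp [numbers2labelsLoop, pvEmit, pvFirst, pvCont, pvSt, hy, hx, List.replicate_succ]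
        · by_cases hx : x = 0 <;>
            simp [numbers2labelsLoop, pvEmit, pvFirst, pvCont, pvSt, hy, hx, List.replicate_succ,
              Ne.symm hyx]

theorem loop_eq_runs (numbers : List Int) :
    numbers2labelsLoop none numbers = (pvRuns numbers).flatMap pvEmit := by
  cases numbers with
  | nil => simp [numbers2labelsLoop, pvRuns]
  | cons x xs =>
      rw [pvRuns, show (1 : Nat) = 0 + 1 from rfl, pvRunsAux_emit xs x 0]
      by_cases hx : x = 0 <;>
        simp [numbers2labelsLoop, pvFirst, pvSt, hx]

-- ===== VERDICT (by name: the statement is the Claim_ definition above) =====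
theorem numbers2labels_spec : Claim_equal_numbers2labels := by
  intro numbers _ _
  unfold Spec_numbers2labels numbers2labels numbers2labels_alt
  exact loop_eq_runs numbers
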